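-- pv_equiv track=rewrite | github.com/GuideboardLabs/foxforge | SourceCode/agents_research/deep_researcher.py | _split_web_sources
-- ===== SOURCE A (Python) =====
-- def _split_web_sources(web_context: str) -> tuple[str, list[str]]:
--     """Split web_context into (header_line, [source_block, ...]).
--
--     Each source block starts with a "- " line (tier/depth prefix) as written by
--     WebResearchEngine.web_context_for_project().
--     """
--     lines = web_context.strip().split("\n")
--     if len(lines) <= 1:
--         return web_context, []
--     header = lines[0]
--     source_blocks: list[str] = []
--     current: list[str] = []
--     for line in lines[1:]:
--         if line.startswith("- "):
--             if current:
--                 source_blocks.append("\n".join(current))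
--             current = [line]
--         elif current:
--             current.append(line)
--     if current:
--         source_blocks.append("\n".join(current))
--     return header, source_blocks
-- ===== SOURCE B (Python) =====
-- def _split_web_sources(web_context: str) -> tuple[str, list[str]]:
--     """Index-then-slice decomposition: find block-start indices, then slice."""
--     lines = web_context.strip().split("\n")
--     if len(lines) <= 1:
--         return web_context, []
--     starts = [i for i, l in enumerate(lines) if i >= 1 and l.startswith("- ")]
--     blocks = ["\n".join(lines[s:e]) for s, e in zip(starts, starts[1:] + [len(lines)])]
--     return lines[0], blocks
-- ===== Notes on version B (the rewrite author's own statement) =====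
-- stated objective: simpler
-- what changed: Replaces A's running-accumulator loop (current block + flush-on-start + trailing flush) with a one-line index table of block-start lines followed by slicing between consecutive start indices.
import Mathlib
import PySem

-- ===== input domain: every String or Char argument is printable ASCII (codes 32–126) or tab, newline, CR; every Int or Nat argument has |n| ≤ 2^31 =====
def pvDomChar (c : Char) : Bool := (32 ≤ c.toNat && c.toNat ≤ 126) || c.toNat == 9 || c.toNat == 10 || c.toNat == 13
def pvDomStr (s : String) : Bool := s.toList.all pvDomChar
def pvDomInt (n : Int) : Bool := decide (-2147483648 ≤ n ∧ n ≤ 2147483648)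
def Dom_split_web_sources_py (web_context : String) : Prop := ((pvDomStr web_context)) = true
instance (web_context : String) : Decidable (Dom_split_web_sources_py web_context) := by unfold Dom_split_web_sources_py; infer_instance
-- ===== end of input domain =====

-- B replaces A's running-accumulator loop by an index table of block starts plus slicing;
-- objective: simpler (no intended behaviour change; both programs are pure).

-- ===== PORT A =====
-- loop body of A's `for line in lines[1:]` (state = (source_blocks, current))
def pvAStep (bc : List String × List String) (line : String) : List String × List String :=
  if PySem.Str.startswith line "- " then
    (if bc.2 ≠ [] then bc.1 ++ [PySem.Str.join "\n" bc.2] else bc.1, [line])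
  else if bc.2 ≠ [] then (bc.1, bc.2 ++ [line]) else bc

-- the trailing `if current: source_blocks.append("\n".join(current))`
def pvAFin (bc : List String × List String) : List String :=
  if bc.2 ≠ [] then bc.1 ++ [PySem.Str.join "\n" bc.2] else bc.1

def split_web_sources_py (web_context : String) : String × List String :=
  -- the separator "\n" is a nonempty literal, so split? is always `some`; `.getD []` is never taken
  let lines := (PySem.Str.split? (PySem.Str.strip web_context) "\n").getD []
  if lines.length ≤ 1 then (web_context, [])
  else
    let header := PySem.List.pyGetD lines 0 ""   -- lines[0]; in range since length ≥ 2
    let st := (PySem.List.slice lines (some 1) none).foldl pvAStep ([], [])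
    (header, pvAFin st)

-- ===== PORT B =====
def split_web_sources_py_alt (web_context : String) : String × List String :=
  let lines := (PySem.Str.split? (PySem.Str.strip web_context) "\n").getD []
  if lines.length ≤ 1 then (web_context, [])
  else
    let starts := ((PySem.List.enumerate lines).filter
      (fun p => decide (1 ≤ p.1) && PySem.Str.startswith p.2 "- ")).map (·.1)
    let blocks := (starts.zip (starts.drop 1 ++ [(lines.length : Int)])).map
      (fun p => PySem.Str.join "\n" (PySem.List.slice lines (some p.1) (some p.2)))
    (PySem.List.pyGetD lines 0 "", blocks)

-- ===== PRECONDITION & SPEC =====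
def Spec_split_web_sources_py (web_context : String) (out : String × List String) : Prop := out = split_web_sources_py_alt web_context
instance (web_context : String) (out : String × List String) : Decidable (Spec_split_web_sources_py web_context out) := by unfold Spec_split_web_sources_py; infer_instance

-- ===== CLAIM (what is proved, stated in full; the proofs are below) =====
def Claim_equal_split_web_sources_py : Prop := ∀ (web_context : String), Dom_split_web_sources_py web_context → Spec_split_web_sources_py web_context (split_web_sources_py web_context)

-- ===== LEMMAS AND PROOFS =====

def pvNP (l : String) : Bool := !(PySem.Str.startswith l "- ")

-- the blocks of a tail `t`, as lists of lines: one block per "- " line, carrying the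
-- following non-"- " lines; lines before the first "- " line are dropped
def pvChunks : List String → List (List String)
  | [] => []
  | x :: xs => if PySem.Str.startswith x "- " then (x :: xs.takeWhile pvNP) :: pvChunks xs else pvChunks xs

-- 0-based indices of the "- " lines of a list
def pvS : List String → List Nat
  | [] => []
  | x :: xs => if PySem.Str.startswith x "- " then 0 :: (pvS xs).map (· + 1) else (pvS xs).map (· + 1)

def pvJ : List String → String := PySem.Str.join "\n"

-- B's zip-of-slices computation, rebased to the tail `t` with 0-based Nat indices
def pvZB (t : List String) : List String :=
  ((pvS t).zip ((pvS t).drop 1 ++ [t.length])).map (fun q => pvJ ((t.drop q.1).take (q.2 - q.1)))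

-- ---- A-side: the accumulator loop produces pvChunks ----

theorem pvA_loop2 (t : List String) (blocks cur : List String) (hc : cur ≠ []) :
    pvAFin (t.foldl pvAStep (blocks, cur)) =
      blocks ++ pvJ (cur ++ t.takeWhile pvNP) :: (pvChunks t).map pvJ := by
  induction t generalizing blocks cur with
  | nil => simp [pvAFin, hc, pvChunks, pvJ]
  | cons x xs ih =>
    by_cases hx : PySem.Chars.startswith x.toList ['-', ' '] = true
    · have h1 : pvAStep (blocks, cur) x = (blocks ++ [pvJ cur], [x]) := by
        simp [pvAStep, hx, hc, pvJ]
      simp only [List.foldl_cons, h1, ih (blocks ++ [pvJ cur]) [x] (by simp)]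
      simp [pvChunks, hx, List.takeWhile, pvNP]
    · have h1 : pvAStep (blocks, cur) x = (blocks, cur ++ [x]) := by
        simp [pvAStep, hx, hc]
      simp only [List.foldl_cons, h1, ih blocks (cur ++ [x]) (by simp)]
      simp [pvChunks, hx, List.takeWhile, pvNP]

theorem pvA_loop1 (t : List String) (blocks : List String) :
    pvAFin (t.foldl pvAStep (blocks, [])) = blocks ++ (pvChunks t).map pvJ := by
  induction t generalizing blocks with
  | nil => simp [pvAFin, pvChunks]
  | cons x xs ih =>
    by_cases hx : PySem.Chars.startswith x.toList ['-', ' '] = true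
    · have h1 : pvAStep (blocks, []) x = (blocks, [x]) := by
        simp [pvAStep, hx]
      simp only [List.foldl_cons, h1, pvA_loop2 xs blocks [x] (by simp)]
      simp [pvChunks, hx]
    · have h1 : pvAStep (blocks, []) x = (blocks, []) := by
        simp [pvAStep, hx]
      simp only [List.foldl_cons, h1, ih blocks]
      simp [pvChunks, hx]

theorem pvToList_dash : "- ".toList = ['-', ' '] := by decide

theorem pvHeadD_shift (l : List Nat) (n : Nat) :
    ((l.map (· + 1)) ++ [n + 1]).headD 0 = (l ++ [n]).headD 0 + 1 := by
  cases l <;> simp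

theorem pvTake_headD (xs : List String) :
    xs.take ((pvS xs ++ [xs.length]).headD 0) = xs.takeWhile pvNP := by
  induction xs with
  | nil => simp
  | cons y ys ih =>
    by_cases hy : PySem.Chars.startswith y.toList ['-', ' '] = true
    · simp [pvS, hy, List.takeWhile, pvNP]
    · simp only [pvS, PySem.Str.startswith_eq, pvToList_dash, List.length_cons]
      rw [if_neg hy]
      rw [show (List.map (· + 1) (pvS ys) ++ [ys.length + 1]) = (pvS ys).map (· + 1) ++ [ys.length + 1] from rfl]
      rw [pvHeadD_shift, List.take_succ_cons, ih]
      simp [List.takeWhile, pvNP, hy]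

theorem pvZB_shift (l : List Nat) (n : Nat) (x : String) (u : List String) :
    ((l.map (· + 1)).zip ((l.map (· + 1)).drop 1 ++ [n + 1])).map
        (fun q => pvJ (((x :: u).drop q.1).take (q.2 - q.1)))
      = (l.zip (l.drop 1 ++ [n])).map (fun q => pvJ ((u.drop q.1).take (q.2 - q.1))) := by
  have h1 : (l.map (· + 1)).drop 1 ++ [n + 1] = (l.drop 1 ++ [n]).map (· + 1) := by
    simp [← List.map_drop]
  rw [h1, List.zip_map, List.map_map]
  apply List.map_congr_left
  intro q _
  simp [Nat.add_sub_add_right]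

theorem pvZip_cons (r : List Nat) (n : Nat) :
    (0 :: r).zip (r ++ [n]) = (0, (r ++ [n]).headD 0) :: r.zip (r.drop 1 ++ [n]) := by
  cases r <;> simp

theorem pvZB_cons_neg (x : String) (xs : List String)
    (hx : PySem.Chars.startswith x.toList ['-', ' '] = false) :
    pvZB (x :: xs) = pvZB xs := by
  unfold pvZB
  simp only [pvS, PySem.Str.startswith_eq, pvToList_dash, hx, Bool.false_eq_true, List.length_cons]
  exact pvZB_shift (pvS xs) xs.length x xs

theorem pvZB_cons_pos (x : String) (xs : List String)
    (hx : PySem.Chars.startswith x.toList ['-', ' '] = true) :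
    pvZB (x :: xs) = pvJ (x :: xs.takeWhile pvNP) :: pvZB xs := by
  unfold pvZB
  simp only [pvS, PySem.Str.startswith_eq, pvToList_dash, hx, if_pos, List.length_cons]
  rw [show ((0 : Nat) :: (pvS xs).map (· + 1)).drop 1 = (pvS xs).map (· + 1) from rfl]
  rw [pvZip_cons ((pvS xs).map (· + 1)) (xs.length + 1)]
  rw [List.map_cons]
  congr 1
  · rw [pvHeadD_shift (pvS xs) xs.length]
    simp only [List.drop_zero, Nat.sub_zero, List.take_succ_cons, pvTake_headD]
  · exact pvZB_shift (pvS xs) xs.length x xs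

theorem pvZB_eq (t : List String) : pvZB t = (pvChunks t).map pvJ := by
  induction t with
  | nil => simp [pvZB, pvS, pvChunks]
  | cons x xs ih =>
    by_cases hx : PySem.Chars.startswith x.toList ['-', ' '] = true
    · rw [pvZB_cons_pos x xs hx, ih]
      simp [pvChunks, hx]
    · rw [pvZB_cons_neg x xs (by simpa using hx), ih]
      simp [pvChunks, hx]



theorem pvStarts_eq (t : List String) (s : Nat) (hs : 1 ≤ s) :
    ((PySem.List.enumerate t (s : Int)).filter
        (fun p => decide (1 ≤ p.1) && PySem.Str.startswith p.2 "- ")).map (·.1)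
      = (pvS t).map (fun k => ((k + s : Nat) : Int)) := by
  induction t generalizing s with
  | nil => simp [PySem.List.enumerate_nil, pvS]
  | cons x xs ih =>
    rw [PySem.List.enumerate_cons]
    have hd : decide (1 ≤ (s : Int)) = true := by simp; exact_mod_cast hs
    have hih := ih (s + 1) (by omega)
    simp only [PySem.Str.startswith_eq, pvToList_dash] at hih
    have hmm : (pvS xs).map (fun k => ((k + (s + 1) : Nat) : Int))
        = ((pvS xs).map (· + 1)).map (fun k => ((k + s : Nat) : Int)) := by
      rw [List.map_map]
      apply List.map_congr_left
      intro k _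
      simp only [Function.comp]
      congr 1
      omega
    have hscast : ((s : Int) + 1) = (((s + 1 : Nat)) : Int) := by push_cast; ring
    by_cases hx : PySem.Chars.startswith x.toList ['-', ' '] = true
    · simp only [List.filter_cons, PySem.Str.startswith_eq, pvToList_dash, hx, hd,
        Bool.and_self, List.map_cons, if_true]
      rw [hscast, hih, hmm]
      simp [pvS, hx]
    · rw [Bool.not_eq_true] at hx
      simp only [List.filter_cons, PySem.Str.startswith_eq, pvToList_dash, hx, hd,
        Bool.and_false, Bool.false_eq_true, if_false]
      rw [hscast, hih, hmm]
      simp [pvS, hx]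



theorem pv_main (wc : String) : split_web_sources_py wc = split_web_sources_py_alt wc := by
  unfold split_web_sources_py split_web_sources_py_alt
  generalize (PySem.Str.split? (PySem.Str.strip wc) "\n").getD [] = L
  cases L with
  | nil => simp
  | cons h t =>
    by_cases hlen : (h :: t).length ≤ 1
    · have ht : t = [] := by cases t <;> simp_all
      simp [ht]
    · simp
      have ht : t ≠ [] := by intro h'; subst h'; simp at hlen
      rw [if_neg ht, if_neg ht]
      congr 1
      -- A's loop result
      rw [PySem.List.slice_from_one, List.tail_cons, pvA_loop1 t [], List.nil_append]
      -- B's index table, rebased to the tail t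
      have hst := pvStarts_eq t 1 le_rfl
      simp only [PySem.Str.startswith_eq, pvToList_dash, Nat.cast_one] at hst
      rw [hst]
      have hc : ((t.length : Int) + 1) = ((t.length + 1 : Nat) : Int) := by push_cast; ring
      rw [hc, show [((t.length + 1 : Nat) : Int)] = [t.length].map (fun k : Nat => ((k + 1 : Nat) : Int)) from rfl]
      rw [← List.map_tail, ← List.map_append, List.zip_map, List.map_map]
      have hzb := pvZB_eq t
      unfold pvZB at hzb
      rw [List.drop_one] at hzb
      rw [← hzb]
      apply List.map_congr_left
      intro q _
      simp only [Function.comp, Prod.map]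
      rw [PySem.List.slice_natCast, List.drop_succ_cons, Nat.add_sub_add_right]
      rfl

-- ===== VERDICT (by name: the statement is the Claim_ definition above) =====
theorem split_web_sources_py_spec : Claim_equal_split_web_sources_py := by
  intro wc _
  unfold Spec_split_web_sources_py
  exact pv_main wc
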